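-- pv_equiv track=rewrite | github.com/hogan-tech/leetcode-solution | Python/3170-lexicographically-minimum-string-after-removing-stars.py | clearStars
-- ===== SOURCE A (Python) =====
-- from collections import defaultdict
--
-- def clearStars(s: str) -> str:
--     counter = defaultdict(list)
--     arrList = list(s)
--     for i, c in enumerate(arrList):
--         if c != '*':
--             counter[ord(c) - ord('a')].append(i)
--         else:
--             for j in range(26):
--                 if counter[j]:
--                     arrList[counter[j].pop()] = '*'
--                     break
--     return "".join(c for c in arrList if c != '*')
-- ===== SOURCE B (Python) =====
-- import heapq
--
-- def clearStars(s: str) -> str: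
--     # Min-heap of (char, -index): pop gives the smallest letter, ties broken
--     # by the most recent position.  Only 'a'..'z' are ever removable.
--     heap = []
--     removed = [False] * len(s)
--     for i, c in enumerate(s):
--         if c == '*':
--             removed[i] = True
--             if heap:
--                 _, ni = heapq.heappop(heap)
--                 removed[-ni] = True
--         elif 'a' <= c <= 'z':
--             heapq.heappush(heap, (c, -i))
--     return ''.join(c for r, c in zip(removed, s) if not r)
-- ===== Notes on version B (the rewrite author's own statement) =====
-- stated objective: idiomatic
-- what changed: Replaces the 26-bucket dict of index lists scanned linearly at every star (and the in-place '*' overwriting of the char array) with a heapq min-heap of (char, -index) plus a boolean removed-mask, joining the surviving characters at the end.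
import Mathlib
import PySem

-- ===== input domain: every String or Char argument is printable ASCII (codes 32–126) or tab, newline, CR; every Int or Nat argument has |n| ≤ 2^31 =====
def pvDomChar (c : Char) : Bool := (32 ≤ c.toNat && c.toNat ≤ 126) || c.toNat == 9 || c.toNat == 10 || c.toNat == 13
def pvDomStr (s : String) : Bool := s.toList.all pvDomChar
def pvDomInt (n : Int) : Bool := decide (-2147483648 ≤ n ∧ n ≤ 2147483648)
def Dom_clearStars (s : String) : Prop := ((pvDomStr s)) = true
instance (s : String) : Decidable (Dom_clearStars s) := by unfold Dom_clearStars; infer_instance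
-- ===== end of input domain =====

-- B replaces A's 26-bucket dict (scanned linearly at each star, with in-place '*' overwriting)
-- by a min-heap of (char, -index) plus a removed-mask: a more idiomatic heapq solution, same results.

-- ===== PORT A =====
-- A's `for i, c in enumerate(arrList)` only ever mutates arrList at positions already passed,
-- so iterating the original characters with an explicit index is exact; `if counter[j]:` on the
-- defaultdict also inserts an empty bucket, which no later read can distinguish from its absence.
def clearStarsStepA (st : PySem.Dict Int (List Int) × List Char) (i : Int) (c : Char) :
    PySem.Dict Int (List Int) × List Char :=
  if c ≠ '*' then
    (st.1.insert ((c.toNat : Int) - 97) (st.1.getD ((c.toNat : Int) - 97) [] ++ [i]), st.2)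
  else
    match (List.range 26).find? (fun (j : Nat) => !(st.1.getD (j : Int) []).isEmpty) with
    | none => st
    | some j =>
      match (st.1.getD (j : Int) []).getLast? with
      | none => st   -- unreachable: find? returned j only because its bucket is nonempty
      | some idx =>
          (st.1.insert (j : Int) (st.1.getD (j : Int) []).dropLast, st.2.set idx.toNat '*')

def clearStarsLoopA : List Char → Int → (PySem.Dict Int (List Int) × List Char) →
    PySem.Dict Int (List Int) × List Char
  | [], _, st => st
  | c :: rest, i, st => clearStarsLoopA rest (i + 1) (clearStarsStepA st i c)

def clearStars (s : String) : String :=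
  String.mk ((clearStarsLoopA s.toList 0 ((PySem.Dict.empty : PySem.Dict Int (List Int)), s.toList)).2.filter
    (fun c => c != '*'))

-- ===== PORT B =====
def lexLE (x y : Char × Int) : Bool := decide (x.1 < y.1 ∨ (x.1 = y.1 ∧ x.2 ≤ y.2))

-- heapq.heappush / heappop ported by their contract: the heap is kept as a list sorted by the
-- tuple order, push is ordered insertion, pop takes the head (the same minimum heapq pops).
def heapPush : List (Char × Int) → (Char × Int) → List (Char × Int)
  | [], x => [x]
  | y :: t, x => if lexLE x y then x :: y :: t else y :: heapPush t x

def clearStarsStepB (st : List (Char × Int) × List Bool) (i : Int) (c : Char) :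
    List (Char × Int) × List Bool :=
  if c = '*' then
    match st.1 with
    | [] => ([], st.2.set i.toNat true)
    | (_, ni) :: t => (t, (st.2.set i.toNat true).set (-ni).toNat true)
  else if 'a' ≤ c ∧ c ≤ 'z' then (heapPush st.1 (c, -i), st.2)
  else st

def clearStarsLoopB : List Char → Int → (List (Char × Int) × List Bool) →
    List (Char × Int) × List Bool
  | [], _, st => st
  | c :: rest, i, st => clearStarsLoopB rest (i + 1) (clearStarsStepB st i c)

def clearStars_alt (s : String) : String :=
  String.mk ((List.zip (clearStarsLoopB s.toList 0 ([], s.toList.map (fun _ => false))).2 s.toList).filterMap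
    (fun p => if p.1 then none else some p.2))

-- ===== PRECONDITION & SPEC =====
def Spec_clearStars (s : String) (out : String) : Prop := out = clearStars_alt s
instance (s : String) (out : String) : Decidable (Spec_clearStars s out) := by unfold Spec_clearStars; infer_instance

-- ===== CLAIM (what is proved, stated in full; the proofs are below) =====
def Claim_equal_clearStars : Prop := ∀ (s : String), Dom_clearStars s → Spec_clearStars s (clearStars s)

-- ===== LEMMAS AND PROOFS =====

/-- A removed flag renders a position as `'*'`. -/
def pvMark (r : Bool) (c : Char) : Char := if r then '*' else c

/-- The heap segment contributed by bucket `j` of A's counter. -/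
def pvSeg (counter : PySem.Dict Int (List Int)) (j : Nat) : List (Char × Int) :=
  ((counter.getD (j : Int) []).reverse).map (fun e => (Char.ofNat (97 + j), -e))

/-- B's heap as a function of A's counter: buckets in letter order, each reversed. -/
def pvHeap (counter : PySem.Dict Int (List Int)) : List (Char × Int) :=
  (List.range 26).flatMap (pvSeg counter)

/-- Simulation invariant between A's state and B's state after processing `i` characters of `cs`. -/
def pvInv (cs : List Char) (i : Int) (stA : PySem.Dict Int (List Int) × List Char)
    (stB : List (Char × Int) × List Bool) : Prop :=
  stB.2.length = cs.length ∧
  stA.2 = List.zipWith pvMark stB.2 cs ∧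
  (∀ k : Nat, k < cs.length → (k : Int) < i → stB.2.getD k false = false → cs.getD k '*' ≠ '*') ∧
  stB.1 = pvHeap stA.1 ∧
  (∀ j : Nat, j < 26 → ∀ e ∈ stA.1.getD (j : Int) [], e < i)

lemma pvZipWith_mark_false (cs : List Char) :
    List.zipWith pvMark (cs.map fun _ => false) cs = cs := by
  induction cs with
  | nil => rfl
  | cons c cs ih => simp only [List.map_cons, List.zipWith_cons_cons, ih]; rfl

lemma pvZipWith_mark_set (removed : List Bool) (cs : List Char) (k : Nat) :
    (List.zipWith pvMark removed cs).set k '*' =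
      List.zipWith pvMark (removed.set k true) cs := by
  induction removed generalizing cs k with
  | nil => simp
  | cons r rs ih =>
    cases cs with
    | nil => simp
    | cons c cs =>
      cases k with
      | zero => simp [pvMark]
      | succ k => simp [ih]

lemma pvZipWith_mark_set_star (removed : List Bool) (cs : List Char) (k : Nat)
    (h : cs.getD k '*' = '*') :
    List.zipWith pvMark removed cs = List.zipWith pvMark (removed.set k true) cs := by
  induction removed generalizing cs k with
  | nil => simp
  | cons r rs ih =>
    cases cs with
    | nil => simp
    | cons c cs =>
      cases k with
      | zero => simp at h; simp [pvMark, h]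
      | succ k => simpa using ih cs k (by simpa using h)

lemma pvFilter_mark (removed : List Bool) (cs : List Char)
    (hlen : removed.length = cs.length)
    (h : ∀ k : Nat, k < cs.length → removed.getD k false = false → cs.getD k '*' ≠ '*') :
    (List.zipWith pvMark removed cs).filter (fun c => c != '*') =
      (List.zip removed cs).filterMap (fun p => if p.1 then none else some p.2) := by
  induction removed generalizing cs with
  | nil =>
    cases cs with
    | nil => rfl
    | cons c cs => simp at hlen
  | cons r rs ih =>
    cases cs with
    | nil => simp at hlen
    | cons c cs =>
      have htail := ih cs (by simpa using hlen)
        (fun k hk hr => h (k + 1) (by simpa using hk) (by simpa using hr))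
      cases r with
      | true => simpa [pvMark] using htail
      | false =>
        have hc : c ≠ '*' := by simpa using h 0 (by simp) (by simp)
        simp [pvMark, hc, htail]

lemma pvSet_true_getD_false (l : List Bool) (m k : Nat)
    (h : (l.set m true).getD k false = false) : l.getD k false = false := by
  by_cases hmk : m = k
  · subst hmk
    by_cases hm : m < l.length
    · simp [List.getD, hm] at h
    · rw [List.set_eq_of_length_le (by omega)] at h
      exact h
  · simpa [List.getD, List.getElem?_set, hmk] using h

lemma pvHeapPush_append (p q : List (Char × Int)) (x : Char × Int)
    (hp : ∀ y ∈ p, lexLE x y = false) (hq : ∀ y ∈ q, lexLE x y = true) :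
    heapPush (p ++ q) x = p ++ x :: q := by
  induction p with
  | nil =>
    cases q with
    | nil => rfl
    | cons y t => simp [heapPush, hq y (by simp)]
  | cons z p ih =>
    have hz := hp z (by simp)
    simp [heapPush, hz]
    exact ih (fun y hy => hp y (by simp [hy]))

lemma pvToNat_ofNat_small (n : Nat) (h : n < 128) : (Char.ofNat n).toNat = n := by
  have hv : n.isValidChar := Or.inl (by omega)
  rw [Char.toNat_ofNat, if_pos hv]

lemma pvSeg_insert_ne (counter : PySem.Dict Int (List Int)) (key : Int) (v : List Int)
    (j : Nat) (hne : (j : Int) ≠ key) :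
    pvSeg (counter.insert key v) j = pvSeg counter j := by
  simp [pvSeg, PySem.Dict.getD_insert, hne]

lemma pvHeap_unchanged (counter : PySem.Dict Int (List Int)) (key : Int) (v : List Int)
    (hkey : key < 0 ∨ 26 ≤ key) :
    pvHeap (counter.insert key v) = pvHeap counter := by
  unfold pvHeap
  apply List.flatMap_congr
  intro j hj
  have : j < 26 := List.mem_range.mp hj
  exact pvSeg_insert_ne _ _ _ _ (by omega)

lemma pvHeap_push (counter : PySem.Dict Int (List Int)) (c : Char) (i : Int)
    (hc1 : 97 ≤ c.toNat) (hc2 : c.toNat ≤ 122)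
    (hb : ∀ j : Nat, j < 26 → ∀ e ∈ counter.getD (j : Int) [], e < i) :
    heapPush (pvHeap counter) (c, -i) =
      pvHeap (counter.insert ((c.toNat : Int) - 97)
        (counter.getD ((c.toNat : Int) - 97) [] ++ [i])) := by
  obtain ⟨j₀, hcn, hj₀lt⟩ : ∃ j₀ : Nat, c.toNat = 97 + j₀ ∧ j₀ < 26 :=
    ⟨c.toNat - 97, by omega, by omega⟩
  have hkey : ((c.toNat : Int) - 97) = (j₀ : Int) := by omega
  have hcchar : Char.ofNat (97 + j₀) = c := by
    rw [← hcn, Char.ofNat_toNat]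
  have hsplit : List.range 26 =
      List.range j₀ ++ [j₀] ++ (List.range (25 - j₀)).map ((j₀ + 1) + ·) := by
    have h1 : List.range (j₀ + 1) = List.range j₀ ++ [j₀] := List.range_succ
    have h2 : (26 : Nat) = (j₀ + 1) + (25 - j₀) := by omega
    rw [h2, List.range_add, h1]
  set counter' := counter.insert ((c.toNat : Int) - 97)
    (counter.getD ((c.toNat : Int) - 97) [] ++ [i]) with hC
  have hsegpre : ∀ j ∈ List.range j₀, pvSeg counter' j = pvSeg counter j := by
    intro j hj
    have : j < j₀ := List.mem_range.mp hj
    exact pvSeg_insert_ne _ _ _ _ (by rw [hkey]; exact_mod_cast by omega)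
  have hsegpost : ∀ j ∈ (List.range (25 - j₀)).map ((j₀ + 1) + ·),
      pvSeg counter' j = pvSeg counter j := by
    intro j hj
    obtain ⟨t, _, rfl⟩ := List.mem_map.mp hj
    exact pvSeg_insert_ne _ _ _ _ (by rw [hkey]; exact_mod_cast by omega)
  have hseg0 : pvSeg counter' j₀ = (c, -i) :: pvSeg counter j₀ := by
    simp only [pvSeg, hC, hkey, PySem.Dict.getD_insert]
    rw [← hkey]
    simp [hcchar]
  have hpre : ∀ y ∈ (List.range j₀).flatMap (pvSeg counter), lexLE (c, -i) y = false := by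
    intro y hy
    obtain ⟨j, hj, hyj⟩ := List.mem_flatMap.mp hy
    have hjlt : j < j₀ := List.mem_range.mp hj
    obtain ⟨e, _, rfl⟩ := List.mem_map.mp hyj
    have hch : (Char.ofNat (97 + j)).toNat = 97 + j := pvToNat_ofNat_small _ (by omega)
    rw [lexLE, decide_eq_false_iff_not]
    rintro (hlt | ⟨heq, -⟩)
    · have h1 : c.toNat < (Char.ofNat (97 + j)).toNat := hlt
      omega
    · have h1 : c = Char.ofNat (97 + j) := heq
      have h2 := congrArg Char.toNat h1
      rw [hch] at h2
      omega
  have hmid : ∀ y ∈ pvSeg counter j₀ ++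
      ((List.range (25 - j₀)).map ((j₀ + 1) + ·)).flatMap (pvSeg counter),
      lexLE (c, -i) y = true := by
    intro y hy
    rw [lexLE, decide_eq_true_iff]
    rcases List.mem_append.mp hy with hy | hy
    · obtain ⟨e, he, rfl⟩ := List.mem_map.mp hy
      have he' : e ∈ counter.getD (j₀ : Int) [] := List.mem_reverse.mp he
      have hei : e < i := hb j₀ hj₀lt e he'
      refine Or.inr ⟨?_, ?_⟩
      · exact hcchar.symm
      · show -i ≤ -e
        omega
    · obtain ⟨j, hj, hyj⟩ := List.mem_flatMap.mp hy
      obtain ⟨t, ht, rfl⟩ := List.mem_map.mp hj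
      have htlt : t < 25 - j₀ := List.mem_range.mp ht
      obtain ⟨e, _, rfl⟩ := List.mem_map.mp hyj
      left
      show c.toNat < (Char.ofNat (97 + (j₀ + 1 + t))).toNat
      rw [pvToNat_ofNat_small _ (by omega)]
      omega
  have e1 : (List.range j₀).flatMap (pvSeg counter') =
      (List.range j₀).flatMap (pvSeg counter) := List.flatMap_congr hsegpre
  have e2 : ((List.range (25 - j₀)).map ((j₀ + 1) + ·)).flatMap (pvSeg counter') =
      ((List.range (25 - j₀)).map ((j₀ + 1) + ·)).flatMap (pvSeg counter) :=
    List.flatMap_congr hsegpost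
  calc heapPush (pvHeap counter) (c, -i)
      = (List.range j₀).flatMap (pvSeg counter) ++ (c, -i) ::
          (pvSeg counter j₀ ++
            ((List.range (25 - j₀)).map ((j₀ + 1) + ·)).flatMap (pvSeg counter)) := by
        rw [pvHeap, hsplit]
        simp only [List.flatMap_append, List.flatMap_cons, List.flatMap_nil, List.append_nil,
          List.append_assoc]
        exact pvHeapPush_append _ _ _ hpre hmid
    _ = pvHeap counter' := by
        rw [pvHeap, hsplit]
        simp only [List.flatMap_append, List.flatMap_cons, List.flatMap_nil, List.append_nil,
          List.append_assoc]
        rw [e1, e2, hseg0]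
        simp

lemma pvHeap_none (counter : PySem.Dict Int (List Int))
    (hfind : (List.range 26).find? (fun (j : Nat) => !(counter.getD (j : Int) []).isEmpty) = none) :
    pvHeap counter = [] := by
  rw [List.find?_eq_none] at hfind
  rw [pvHeap, List.flatMap_eq_nil_iff]
  intro j hj
  have := hfind j hj
  simp at this
  simp [pvSeg, this]

lemma pvHeap_pop (counter : PySem.Dict Int (List Int)) (j₀ : Nat)
    (hfind : (List.range 26).find? (fun (j : Nat) => !(counter.getD (j : Int) []).isEmpty) = some j₀) :
    ∃ hb : counter.getD (j₀ : Int) [] ≠ [],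
      pvHeap counter = (Char.ofNat (97 + j₀), -((counter.getD (j₀ : Int) []).getLast hb)) ::
        pvHeap (counter.insert (j₀ : Int) (counter.getD (j₀ : Int) []).dropLast) := by
  rw [List.find?_eq_some_iff_append] at hfind
  obtain ⟨hpred, l₁, l₂, hsplit, hl₁⟩ := hfind
  have hbne : counter.getD (j₀ : Int) [] ≠ [] := by simpa using hpred
  refine ⟨hbne, ?_⟩
  have hnodup : (l₁ ++ j₀ :: l₂).Nodup := by rw [← hsplit]; exact List.nodup_range
  have hj₀l₁ : j₀ ∉ l₁ := fun hmem =>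
    (List.disjoint_of_nodup_append hnodup) hmem (by simp)
  have hj₀l₂ : j₀ ∉ l₂ :=
    (List.nodup_cons.mp (List.Nodup.of_append_right hnodup)).1
  have hempty : ∀ x ∈ l₁, counter.getD (x : Int) [] = [] := by
    intro x hx
    have := hl₁ x hx
    simpa using this
  have hrev : (counter.getD (j₀ : Int) []).reverse =
      (counter.getD (j₀ : Int) []).getLast hbne ::
        (counter.getD (j₀ : Int) []).dropLast.reverse := by
    conv_lhs => rw [← List.dropLast_append_getLast hbne]
    simp
  set counter' := counter.insert (j₀ : Int) (counter.getD (j₀ : Int) []).dropLast with hC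
  have hseg0 : pvSeg counter j₀ =
      (Char.ofNat (97 + j₀), -((counter.getD (j₀ : Int) []).getLast hbne)) ::
        pvSeg counter' j₀ := by
    simp [pvSeg, hC, hrev]
  have hl₁nil : ∀ x ∈ l₁, pvSeg counter x = [] := by
    intro x hx
    simp [pvSeg, hempty x hx]
  have hl₁nil' : ∀ x ∈ l₁, pvSeg counter' x = [] := by
    intro x hx
    have hne : (x : Int) ≠ (j₀ : Int) := by
      intro hxe
      exact hj₀l₁ (by rwa [Int.natCast_inj.mp hxe] at hx)
    rw [pvSeg_insert_ne _ _ _ _ hne]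
    exact hl₁nil x hx
  have hl₂seg : ∀ x ∈ l₂, pvSeg counter' x = pvSeg counter x := by
    intro x hx
    refine pvSeg_insert_ne _ _ _ _ (fun hxe => ?_)
    exact hj₀l₂ (by rwa [Int.natCast_inj.mp hxe] at hx)
  rw [pvHeap, pvHeap, hsplit]
  simp only [List.flatMap_append, List.flatMap_cons]
  rw [List.flatMap_eq_nil_iff.mpr hl₁nil, List.flatMap_eq_nil_iff.mpr hl₁nil',
    List.flatMap_congr hl₂seg, hseg0]
  simp

lemma pvGetD_append (pre rest : List Char) (c : Char) :
    (pre ++ c :: rest).getD pre.length '*' = c := by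
  have h : (pre ++ c :: rest)[pre.length]? = some c := by
    rw [List.getElem?_append_right (Nat.le_refl _)]
    simp
  simp [List.getD]

lemma pvStep (pre rest : List Char) (c : Char)
    (stA : PySem.Dict Int (List Int) × List Char) (stB : List (Char × Int) × List Bool)
    (h : pvInv (pre ++ c :: rest) ((pre.length : Int)) stA stB) :
    pvInv (pre ++ c :: rest) ((pre.length : Int) + 1)
      (clearStarsStepA stA (pre.length : Int) c) (clearStarsStepB stB (pre.length : Int) c) := by
  obtain ⟨hlen, harr, hpref, hheap, hbuck⟩ := h
  have hcsl : pre.length < (pre ++ c :: rest).length := by simp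
  have hgetc := pvGetD_append pre rest c
  have htn : ((pre.length : Int)).toNat = pre.length := Int.toNat_natCast _
  by_cases hstar : c = '*'
  · subst hstar
    cases hfind : (List.range 26).find? (fun (j : Nat) => !(stA.1.getD (j : Int) []).isEmpty) with
    | none =>
      have hnil : pvHeap stA.1 = [] := pvHeap_none _ hfind
      have hstA : clearStarsStepA stA (pre.length : Int) '*' = stA := by
        simp [clearStarsStepA, hfind]
      have hB1 : stB.1 = [] := by rw [hheap, hnil]
      have hstB : clearStarsStepB stB (pre.length : Int) '*' =
          ([], stB.2.set pre.length true) := by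
        simp [clearStarsStepB, hB1, htn]
      rw [hstA, hstB]
      refine ⟨by simpa using hlen, ?_, ?_, by rw [hnil], fun j hj e he => by
        have := hbuck j hj e he; omega⟩
      · rw [harr]
        exact pvZipWith_mark_set_star _ _ _ hgetc
      · intro k hk hki hr
        by_cases hkcase : (k : Int) < (pre.length : Int)
        · exact hpref k hk hkcase (pvSet_true_getD_false _ _ _ hr)
        · have hkeq : k = pre.length := by omega
          have hklt : pre.length < stB.2.length := by rw [hlen]; exact hcsl
          rw [hkeq] at hr
          simp [List.getD, hklt] at hr
    | some j₀ =>
      obtain ⟨hbne, hdecomp⟩ := pvHeap_pop _ _ hfind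
      have hlast? : (stA.1.getD (j₀ : Int) []).getLast? =
          some ((stA.1.getD (j₀ : Int) []).getLast hbne) := List.getLast?_eq_some_getLast hbne
      have hstA : clearStarsStepA stA (pre.length : Int) '*' =
          (stA.1.insert (j₀ : Int) (stA.1.getD (j₀ : Int) []).dropLast,
            stA.2.set ((stA.1.getD (j₀ : Int) []).getLast hbne).toNat '*') := by
        simp [clearStarsStepA, hfind, hlast?]
      have hB1 : stB.1 = (Char.ofNat (97 + j₀), -((stA.1.getD (j₀ : Int) []).getLast hbne)) ::
          pvHeap (stA.1.insert (j₀ : Int) (stA.1.getD (j₀ : Int) []).dropLast) := by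
        rw [hheap, hdecomp]
      have hstB : clearStarsStepB stB (pre.length : Int) '*' =
          (pvHeap (stA.1.insert (j₀ : Int) (stA.1.getD (j₀ : Int) []).dropLast),
            (stB.2.set pre.length true).set
              ((stA.1.getD (j₀ : Int) []).getLast hbne).toNat true) := by
        simp [clearStarsStepB, hB1, htn]
      rw [hstA, hstB]
      refine ⟨by simpa using hlen, ?_, ?_, rfl, ?_⟩
      · rw [harr, pvZipWith_mark_set_star _ _ _ hgetc, pvZipWith_mark_set]
      · intro k hk hki hr
        by_cases hkcase : (k : Int) < (pre.length : Int)
        · exact hpref k hk hkcase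
            (pvSet_true_getD_false _ _ _ (pvSet_true_getD_false _ _ _ hr))
        · have hkeq : k = pre.length := by omega
          have hklt : pre.length < stB.2.length := by rw [hlen]; exact hcsl
          rw [hkeq] at hr
          rcases eq_or_ne (((stA.1.getD (j₀ : Int) []).getLast hbne).toNat) pre.length with hek | hek <;>
            simp [List.getD, hek, hklt] at hr
      · intro j hj e he
        rw [PySem.Dict.getD_insert] at he
        by_cases hje : (j : Int) = (j₀ : Int)
        · rw [if_pos hje] at he
          have : e ∈ stA.1.getD (j₀ : Int) [] := List.dropLast_subset _ (hje ▸ he)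
          have hj26 : (j₀ : Nat) < 26 := by
            have := Int.natCast_inj.mp hje
            omega
          have := hbuck j₀ hj26 e this
          omega
        · rw [if_neg hje] at he
          have := hbuck j hj e he
          omega
  · have hstA : clearStarsStepA stA (pre.length : Int) c =
        (stA.1.insert ((c.toNat : Int) - 97)
          (stA.1.getD ((c.toNat : Int) - 97) [] ++ [(pre.length : Int)]), stA.2) := by
      simp [clearStarsStepA, hstar]
    have hprefnew : ∀ k : Nat, k < (pre ++ c :: rest).length → (k : Int) < (pre.length : Int) + 1 →
        stB.2.getD k false = false → (pre ++ c :: rest).getD k '*' ≠ '*' := by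
      intro k hk hki hr
      by_cases hkcase : (k : Int) < (pre.length : Int)
      · exact hpref k hk hkcase hr
      · have hkeq : k = pre.length := by omega
        subst hkeq
        rw [hgetc]
        exact hstar
    by_cases hlow : 'a' ≤ c ∧ c ≤ 'z'
    · have hc1 : 97 ≤ c.toNat := hlow.1
      have hc2 : c.toNat ≤ 122 := hlow.2
      have hstB : clearStarsStepB stB (pre.length : Int) c =
          (heapPush stB.1 (c, -(pre.length : Int)), stB.2) := by
        simp [clearStarsStepB, hstar, hlow]
      rw [hstA, hstB]
      refine ⟨hlen, harr, hprefnew, ?_, ?_⟩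
      · rw [hheap]
        exact pvHeap_push _ _ _ hc1 hc2 hbuck
      · intro j hj e he
        rw [PySem.Dict.getD_insert] at he
        by_cases hje : (j : Int) = ((c.toNat : Int) - 97)
        · rw [if_pos hje] at he
          rcases List.mem_append.mp (hje ▸ he) with he' | he'
          · have := hbuck j hj e he'; omega
          · simp at he'
            omega
        · rw [if_neg hje] at he
          have := hbuck j hj e he
          omega
    · have hkout : ((c.toNat : Int) - 97) < 0 ∨ 26 ≤ ((c.toNat : Int) - 97) := by
        rcases not_and_or.mp hlow with hcl | hcl
        · left
          have h97 : ¬ (97 ≤ c.toNat) := fun hh => hcl hh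
          omega
        · right
          have h122 : ¬ (c.toNat ≤ 122) := fun hh => hcl hh
          omega
      have hstB : clearStarsStepB stB (pre.length : Int) c = stB := by
        simp [clearStarsStepB, hstar, hlow]
      rw [hstA, hstB]
      refine ⟨hlen, harr, hprefnew, ?_, ?_⟩
      · rw [hheap, pvHeap_unchanged _ _ _ hkout]
      · intro j hj e he
        rw [PySem.Dict.getD_insert, if_neg (by omega)] at he
        have := hbuck j hj e he
        omega

lemma pvLoop (rest : List Char) : ∀ (pre : List Char)
    (stA : PySem.Dict Int (List Int) × List Char) (stB : List (Char × Int) × List Bool),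
    pvInv (pre ++ rest) (pre.length : Int) stA stB →
    pvInv (pre ++ rest) ((pre ++ rest).length : Int)
      (clearStarsLoopA rest (pre.length : Int) stA)
      (clearStarsLoopB rest (pre.length : Int) stB) := by
  induction rest with
  | nil =>
    intro pre stA stB h
    simpa [clearStarsLoopA, clearStarsLoopB] using h
  | cons c rest ih =>
    intro pre stA stB h
    have hstep := pvStep pre rest c stA stB h
    have hlen1 : ((pre ++ [c]).length : Int) = (pre.length : Int) + 1 := by
      simp
    have hres := ih (pre ++ [c]) _ _ (by rw [hlen1]; simpa [List.append_assoc] using hstep)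
    rw [hlen1] at hres
    simpa [clearStarsLoopA, clearStarsLoopB, List.append_assoc] using hres

-- ===== VERDICT (by name: the statement is the Claim_ definition above) =====
theorem clearStars_spec : Claim_equal_clearStars := by
  unfold Claim_equal_clearStars
  intro s _
  unfold Spec_clearStars clearStars clearStars_alt
  have hinit : pvInv s.toList 0 ((PySem.Dict.empty : PySem.Dict Int (List Int)), s.toList)
      ([], s.toList.map fun _ => false) := by
    refine ⟨by simp, (pvZipWith_mark_false s.toList).symm, ?_, ?_, ?_⟩
    · intro k _ hk
      exact absurd hk (by omega)
    · simp [pvHeap, pvSeg, PySem.Dict.getD_empty]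
    · intro j _ e he
      simp [PySem.Dict.getD_empty] at he
  have hinit0 : pvInv ([] ++ s.toList) ((([] : List Char).length : Int))
      ((PySem.Dict.empty : PySem.Dict Int (List Int)), s.toList)
      ([], s.toList.map fun _ => false) := by simpa using hinit
  have hfin := pvLoop s.toList [] _ _ hinit0
  simp only [List.nil_append, List.length_nil, Nat.cast_zero] at hfin
  obtain ⟨hlen, harr, hpref, -, -⟩ := hfin
  rw [harr]
  exact congrArg String.mk (pvFilter_mark _ _ hlen
    (fun k hk => hpref k hk (by exact_mod_cast hk)))
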